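-- pv_equiv track=rewrite | github.com/rodrigosemicolon/AlgInfTheory | assignment_1/src/langsegments.py | get_stran
-- ===== SOURCE A (Python) =====
-- def get_stran(data, thresh):
--     blocks = []
--     i = 0
--     flag = [False for i in data]
--     for i in range(len(data)):
--         if data[i] <= thresh and not flag[i]:
--             val = data[i]
--             beg = i
--             end = i
--             for j in range(i + 1, len(data)):
--                 if data[j] <= thresh:
--                     val += data[j]
--                     flag[j] = True
--                     end = j
--                 else:
--                     break
--             if beg != end:
--                 blocks.append(((beg, end), val))
--         flag[i] = True
--
--     return blocks
-- ===== SOURCE B (Python) =====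
-- def get_stran(data, thresh):
--     blocks = []
--     in_run = False
--     start = last = 0
--     s = 0
--     for i, x in enumerate(data):
--         if x <= thresh:
--             if in_run:
--                 s += x
--                 last = i
--             else:
--                 in_run = True
--                 start = last = i
--                 s = x
--         else:
--             if in_run and last != start:
--                 blocks.append(((start, last), s))
--             in_run = False
--     if in_run and last != start:
--         blocks.append(((start, last), s))
--     return blocks
-- ===== Notes on version B (the rewrite author's own statement) =====
-- stated objective: simpler
-- what changed: Replaces A's flag array and nested rescan loop with a single linear pass that maintains open-run state (start, last, sum) and flushes a run when it closes or at the end.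
import Mathlib
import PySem

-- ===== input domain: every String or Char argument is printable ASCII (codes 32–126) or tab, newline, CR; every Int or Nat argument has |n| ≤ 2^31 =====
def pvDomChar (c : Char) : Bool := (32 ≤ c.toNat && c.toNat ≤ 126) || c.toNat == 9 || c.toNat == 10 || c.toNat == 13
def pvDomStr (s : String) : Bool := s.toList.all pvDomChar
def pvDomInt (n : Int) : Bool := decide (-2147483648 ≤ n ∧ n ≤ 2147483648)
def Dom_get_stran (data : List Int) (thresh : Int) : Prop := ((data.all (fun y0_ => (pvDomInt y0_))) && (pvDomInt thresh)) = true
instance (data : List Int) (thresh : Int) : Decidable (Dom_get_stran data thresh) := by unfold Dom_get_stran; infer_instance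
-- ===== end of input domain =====

-- B replaces A's flag array and nested rescan with a single pass keeping open-run state: simpler decomposition, same O(n) cost.

-- ===== PORT A =====
-- inner `for j in range(i+1, len(data))` loop with its break; all indices are in range, so data[j] is data.getD j 0 (exact)
def innerA (data : List Int) (thresh : Int) (j : Nat) (val : Int) (endd : Nat) (flag : List Bool) :
    Int × Nat × List Bool :=
  if h : j < data.length then
    if data.getD j 0 ≤ thresh then
      innerA data thresh (j+1) (val + data.getD j 0) j (flag.set j true)
    else (val, endd, flag)
  else (val, endd, flag)
termination_by data.length - j

-- outer `for i in range(len(data))` loop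
def outerA (data : List Int) (thresh : Int) (i : Nat) (flag : List Bool)
    (blocks : List ((Int × Int) × Int)) : List ((Int × Int) × Int) :=
  if h : i < data.length then
    let p :=
      if data.getD i 0 ≤ thresh ∧ flag.getD i false = false then
        let r := innerA data thresh (i+1) (data.getD i 0) i flag
        ((if i ≠ r.2.1 then blocks ++ [(((i : Int), (r.2.1 : Int)), r.1)] else blocks), r.2.2)
      else (blocks, flag)
    outerA data thresh (i+1) (p.2.set i true) p.1
  else blocks
termination_by data.length - i

def get_stran (data : List Int) (thresh : Int) : List ((Int × Int) × Int) :=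
  outerA data thresh 0 (data.map (fun _ => false)) []

-- ===== PORT B =====
structure BState where
  blocks : List ((Int × Int) × Int)
  inRun : Bool
  start : Int
  last : Int
  sum : Int

def stepB (thresh : Int) (st : BState) (p : Int × Int) : BState :=
  if p.2 ≤ thresh then
    if st.inRun then { st with sum := st.sum + p.2, last := p.1 }
    else { blocks := st.blocks, inRun := true, start := p.1, last := p.1, sum := p.2 }
  else
    if st.inRun ∧ st.last ≠ st.start then
      { st with blocks := st.blocks ++ [((st.start, st.last), st.sum)], inRun := false }
    else { st with inRun := false }

-- the trailing `if in_run and last != start` flush after the loop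
def flushB (st : BState) : List ((Int × Int) × Int) :=
  if st.inRun ∧ st.last ≠ st.start then st.blocks ++ [((st.start, st.last), st.sum)] else st.blocks

def get_stran_alt (data : List Int) (thresh : Int) : List ((Int × Int) × Int) :=
  flushB ((PySem.List.enumerate data).foldl (stepB thresh) ⟨[], false, 0, 0, 0⟩)

-- ===== PRECONDITION & SPEC =====
def Spec_get_stran (data : List Int) (thresh : Int) (out : List ((Int × Int) × Int)) : Prop := out = get_stran_alt data thresh
instance (data : List Int) (thresh : Int) (out : List ((Int × Int) × Int)) : Decidable (Spec_get_stran data thresh out) := by unfold Spec_get_stran; infer_instance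

-- ===== CLAIM (what is proved, stated in full; the proofs are below) =====
def Claim_equal_get_stran : Prop := ∀ (data : List Int) (thresh : Int), Dom_get_stran data thresh → Spec_get_stran data thresh (get_stran data thresh)

-- ===== LEMMAS AND PROOFS =====

-- first index ≥ j at which the sub-threshold run stops (end of data or value above thresh)
def runEnd (data : List Int) (thresh : Int) (j : Nat) : Nat :=
  if h : j < data.length ∧ data.getD j 0 ≤ thresh then runEnd data thresh (j+1) else j
termination_by data.length - j
decreasing_by omega

-- sum of the run starting at j
def sumRun (data : List Int) (thresh : Int) (j : Nat) : Int :=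
  if h : j < data.length ∧ data.getD j 0 ≤ thresh then data.getD j 0 + sumRun data thresh (j+1) else 0
termination_by data.length - j
decreasing_by omega

theorem runEnd_ge (data : List Int) (thresh : Int) (j : Nat) : j ≤ runEnd data thresh j := by
  fun_induction runEnd data thresh j with
  | case1 j h ih => omega
  | case2 j h => omega

theorem runEnd_le (data : List Int) (thresh : Int) (j : Nat) (h : j ≤ data.length) :
    runEnd data thresh j ≤ data.length := by
  fun_induction runEnd data thresh j with
  | case1 j h ih => exact ih (by omega)
  | case2 j h => exact h

-- canonical result of scanning from index i with no open run
def S (data : List Int) (thresh : Int) (i : Nat) : List ((Int × Int) × Int) :=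
  if h : i < data.length then
    if data.getD i 0 ≤ thresh then
      (if i ≠ runEnd data thresh (i+1) - 1 then
        [(((i : Int), ((runEnd data thresh (i+1) - 1 : Nat) : Int)), data.getD i 0 + sumRun data thresh (i+1))]
      else []) ++ S data thresh (runEnd data thresh (i+1))
    else S data thresh (i+1)
  else []
termination_by data.length - i
decreasing_by
  · have := runEnd_ge data thresh (i+1); omega
  · omega

theorem runEnd_step (data : List Int) (thresh : Int) (j : Nat) (h : j < data.length)
    (hx : data.getD j 0 ≤ thresh) : runEnd data thresh j = runEnd data thresh (j+1) := by
  conv_lhs => rw [runEnd]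
  exact dif_pos ⟨h, hx⟩

theorem runEnd_stop (data : List Int) (thresh : Int) (j : Nat)
    (h : ¬ (j < data.length ∧ data.getD j 0 ≤ thresh)) : runEnd data thresh j = j := by
  rw [runEnd]; exact dif_neg h

theorem sumRun_step (data : List Int) (thresh : Int) (j : Nat) (h : j < data.length)
    (hx : data.getD j 0 ≤ thresh) :
    sumRun data thresh j = data.getD j 0 + sumRun data thresh (j+1) := by
  conv_lhs => rw [sumRun]
  exact dif_pos ⟨h, hx⟩

theorem sumRun_stop (data : List Int) (thresh : Int) (j : Nat)
    (h : ¬ (j < data.length ∧ data.getD j 0 ≤ thresh)) : sumRun data thresh j = 0 := by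
  rw [sumRun]; exact dif_neg h

theorem innerA_val_end (data : List Int) (thresh : Int) (j : Nat) (val : Int) (endd : Nat) (flag : List Bool) :
    (innerA data thresh j val endd flag).1 = val + sumRun data thresh j ∧
    (innerA data thresh j val endd flag).2.1 = if runEnd data thresh j = j then endd else runEnd data thresh j - 1 := by
  fun_induction innerA data thresh j val endd flag with
  | case1 j val endd flag h hx ih =>
    obtain ⟨ih1, ih2⟩ := ih
    have hr := runEnd_step data thresh j h hx
    have hs := sumRun_step data thresh j h hx
    have hge := runEnd_ge data thresh (j+1)
    refine ⟨by rw [ih1, hs]; ring, ?_⟩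
    rw [ih2, hr]
    split_ifs with h1 h2 h3 <;> omega
  | case2 j val endd flag h hx =>
    have hr := runEnd_stop data thresh j (by tauto)
    have hs := sumRun_stop data thresh j (by tauto)
    simp [hr, hs]
  | case3 j val endd flag h =>
    have hr := runEnd_stop data thresh j (by tauto)
    have hs := sumRun_stop data thresh j (by tauto)
    simp [hr, hs]

theorem innerA_flag_len (data : List Int) (thresh : Int) (j : Nat) (val : Int) (endd : Nat) (flag : List Bool) :
    (innerA data thresh j val endd flag).2.2.length = flag.length := by
  fun_induction innerA data thresh j val endd flag with
  | case1 j val endd flag h hx ih => rw [ih]; exact List.length_set ..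
  | case2 => rfl
  | case3 => rfl

theorem innerA_flag_getD (data : List Int) (thresh : Int) (j : Nat) (val : Int) (endd : Nat) (flag : List Bool) :
    flag.length = data.length → ∀ (k : Nat),
    ((innerA data thresh j val endd flag).2.2).getD k false =
      if j ≤ k ∧ k < runEnd data thresh j then true else flag.getD k false := by
  fun_induction innerA data thresh j val endd flag with
  | case1 j val endd flag h hx ih =>
    intro hlen k
    have hr := runEnd_step data thresh j h hx
    have hge := runEnd_ge data thresh (j+1)
    rw [ih (by simpa using hlen) k, hr]
    have hset : (flag.set j true).getD k false = if k = j then true else flag.getD k false := by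
      by_cases hk : k = j
      · subst hk
        simp [List.getD_eq_getElem?_getD, hlen, h]
      · simp [List.getD_eq_getElem?_getD, List.getElem?_set_ne (by omega : j ≠ k), hk]
    rw [hset]
    split_ifs <;> first | rfl | omega
  | case2 j val endd flag h hx =>
    intro hlen k
    have hr := runEnd_stop data thresh j (by tauto)
    simp [hr]
  | case3 j val endd flag h =>
    intro hlen k
    have hr := runEnd_stop data thresh j (by tauto)
    simp [hr]

theorem outerA_eq_S (data : List Int) (thresh : Int) :
    ∀ (n i e : Nat) (flag : List Bool) (blocks : List ((Int × Int) × Int)),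
    data.length - i = n →
    flag.length = data.length → i ≤ e → e ≤ data.length →
    (∀ j, i ≤ j → j < e → flag.getD j false = true) →
    (∀ j, e ≤ j → j < data.length → flag.getD j false = false) →
    outerA data thresh i flag blocks = blocks ++ S data thresh e := by
  intro n
  induction n with
  | zero =>
    intro i e flag blocks h0 hlen hie hel htrue hfalse
    have he : e = data.length := by omega
    subst he
    rw [outerA, dif_neg (by omega), S, dif_neg (by omega), List.append_nil]
  | succ n ih =>
    intro i e flag blocks h0 hlen hie hel htrue hfalse
    have hi : i < data.length := by omega
    rw [outerA, dif_pos hi]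
    rcases Nat.lt_or_ge i e with hic | hic
    · -- i < e : flag[i] is true, the outer loop skips i
      have hfi : flag.getD i false = true := htrue i (le_refl i) hic
      simp only [hfi, Bool.true_eq_false, and_false, if_false]
      refine ih (i+1) e (flag.set i true) blocks (by omega) (by simpa using hlen) (by omega) hel ?_ ?_
      · intro j h1 h2
        rw [List.getD_eq_getElem?_getD, List.getElem?_set_ne (by omega : i ≠ j),
          ← List.getD_eq_getElem?_getD]
        exact htrue j (by omega) h2
      · intro j h1 h2
        rw [List.getD_eq_getElem?_getD, List.getElem?_set_ne (by omega : i ≠ j),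
          ← List.getD_eq_getElem?_getD]
        exact hfalse j h1 h2
    · -- i = e : flag[i] is false, fresh position
      have hie' : i = e := by omega
      subst hie'
      have hfi : flag.getD i false = false := hfalse i (le_refl i) hi
      by_cases hx : data.getD i 0 ≤ thresh
      · simp only [hx, hfi, and_self, if_true]
        have hr := runEnd_ge data thresh (i+1)
        have hrle := runEnd_le data thresh (i+1) (by omega)
        have hve := innerA_val_end data thresh (i+1) (data.getD i 0) i flag
        have hfl := innerA_flag_len data thresh (i+1) (data.getD i 0) i flag
        have hfg := innerA_flag_getD data thresh (i+1) (data.getD i 0) i flag hlen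
        have hend : (innerA data thresh (i+1) (data.getD i 0) i flag).2.1 =
            runEnd data thresh (i+1) - 1 := by
          rw [hve.2]; split_ifs with h1 <;> omega
        rw [ih (i+1) (runEnd data thresh (i+1)) _ _ (by omega) (by simpa using hfl ▸ hlen)
          (by omega) hrle ?_ ?_]
        · conv_rhs => rw [S]
          rw [dif_pos hi, if_pos hx, hend, hve.1]
          split_ifs with h1 <;> simp
        · intro j h1 h2
          rw [List.getD_eq_getElem?_getD, List.getElem?_set_ne (by omega : i ≠ j),
            ← List.getD_eq_getElem?_getD, hfg j]
          exact if_pos ⟨h1, h2⟩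
        · intro j h1 h2
          rw [List.getD_eq_getElem?_getD, List.getElem?_set_ne (by omega : i ≠ j),
            ← List.getD_eq_getElem?_getD, hfg j, if_neg (by omega)]
          exact hfalse j (by omega) h2
      · simp only [hx, false_and, if_false]
        rw [ih (i+1) (i+1) (flag.set i true) blocks (by omega) (by simpa using hlen)
          (le_refl _) (by omega) (by omega) ?_]
        · conv_rhs => rw [S]
          rw [dif_pos hi, if_neg hx]
        · intro j h1 h2
          rw [List.getD_eq_getElem?_getD, List.getElem?_set_ne (by omega : i ≠ j),
            ← List.getD_eq_getElem?_getD]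
          exact hfalse j (by omega) h2

theorem bloop_eq_S (data : List Int) (thresh : Int) :
    ∀ (n i : Nat), data.length - i = n → i ≤ data.length →
    (∀ (blocks : List ((Int × Int) × Int)) (a b c : Int),
      flushB ((PySem.List.enumerate (data.drop i) (i : Int)).foldl (stepB thresh) ⟨blocks, false, a, b, c⟩)
        = blocks ++ S data thresh i) ∧
    (∀ (blocks : List ((Int × Int) × Int)) (start : Nat) (s : Int), start < i →
      flushB ((PySem.List.enumerate (data.drop i) (i : Int)).foldl (stepB thresh) ⟨blocks, true, (start : Int), ((i - 1 : Nat) : Int), s⟩)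
        = blocks ++
          (if start ≠ runEnd data thresh i - 1 then
            [(((start : Int), ((runEnd data thresh i - 1 : Nat) : Int)), s + sumRun data thresh i)]
          else []) ++ S data thresh (runEnd data thresh i)) := by
  intro n
  induction n with
  | zero =>
    intro i h0 hile
    have hi : i = data.length := by omega
    subst hi
    have hstop := runEnd_stop data thresh data.length (by omega)
    have hsum := sumRun_stop data thresh data.length (by omega)
    have hS : S data thresh data.length = [] := by rw [S, dif_neg (by omega)]
    constructor
    · intro blocks a b c
      rw [List.drop_length, PySem.List.enumerate_nil, List.foldl_nil, hS, List.append_nil]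
      simp [flushB]
    · intro blocks start s hstart
      rw [List.drop_length, PySem.List.enumerate_nil, List.foldl_nil, hstop, hsum, hS,
        List.append_nil]
      simp only [flushB]
      split_ifs with h1 h2 h2 <;> simp_all
  | succ n ih =>
    intro i h0 hile
    have hi : i < data.length := by omega
    obtain ⟨ih1, ih2⟩ := ih (i+1) (by omega) (by omega)
    have hdrop : data.drop i = data[i] :: data.drop (i+1) := List.drop_eq_getElem_cons hi
    have hgd : data.getD i 0 = data[i] := List.getD_eq_getElem data 0 hi
    have hcast : ((i : Int) + 1) = ((i + 1 : Nat) : Int) := by push_cast; ring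
    constructor
    · intro blocks a b c
      rw [hdrop, PySem.List.enumerate_cons, List.foldl_cons, hcast]
      by_cases hx : data[i] ≤ thresh
      · have hstep : stepB thresh ⟨blocks, false, a, b, c⟩ ((i : Int), data[i]) =
            ⟨blocks, true, (i : Int), (i : Int), data[i]⟩ := by
          simp [stepB, hx]
        rw [hstep]
        have h2 := ih2 blocks i (data[i]) (by omega)
        simp only [Nat.add_sub_cancel] at h2
        rw [h2]
        conv_rhs => rw [S]
        rw [dif_pos hi, if_pos (show data.getD i 0 ≤ thresh by rw [hgd]; exact hx), hgd, List.append_assoc]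
      · have hstep : stepB thresh ⟨blocks, false, a, b, c⟩ ((i : Int), data[i]) =
            ⟨blocks, false, a, b, c⟩ := by
          simp [stepB, hx]
        rw [hstep, ih1 blocks a b c]
        conv_rhs => rw [S]
        rw [dif_pos hi, if_neg (show ¬ data.getD i 0 ≤ thresh by rw [hgd]; exact hx)]
    · intro blocks start s hstart
      rw [hdrop, PySem.List.enumerate_cons, List.foldl_cons, hcast]
      by_cases hx : data[i] ≤ thresh
      · have hstep : stepB thresh ⟨blocks, true, (start : Int), ((i - 1 : Nat) : Int), s⟩
            ((i : Int), data[i]) = ⟨blocks, true, (start : Int), (i : Int), s + data[i]⟩ := by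
          simp [stepB, hx]
        rw [hstep]
        have h2 := ih2 blocks start (s + data[i]) (by omega)
        simp only [Nat.add_sub_cancel] at h2
        rw [h2, runEnd_step data thresh i hi (show data.getD i 0 ≤ thresh by rw [hgd]; exact hx),
          sumRun_step data thresh i hi (show data.getD i 0 ≤ thresh by rw [hgd]; exact hx), hgd]
        simp [add_assoc]
      · have hstop : runEnd data thresh i = i := by
          apply runEnd_stop
          rw [hgd]; tauto
        have hsum : sumRun data thresh i = 0 := by
          apply sumRun_stop
          rw [hgd]; tauto
        have hSi : S data thresh i = S data thresh (i+1) := by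
          conv_lhs => rw [S]
          rw [dif_pos hi, if_neg (show ¬ data.getD i 0 ≤ thresh by rw [hgd]; exact hx)]
        by_cases hc : start = i - 1
        · have hstep : stepB thresh ⟨blocks, true, (start : Int), ((i - 1 : Nat) : Int), s⟩
              ((i : Int), data[i]) = ⟨blocks, false, (start : Int), ((i - 1 : Nat) : Int), s⟩ := by
            simp [stepB, hx]
            omega
          rw [hstep, ih1 blocks _ _ _, hstop, hsum, hSi, if_neg (by omega)]
          simp
        · have hstep : stepB thresh ⟨blocks, true, (start : Int), ((i - 1 : Nat) : Int), s⟩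
              ((i : Int), data[i]) =
              ⟨blocks ++ [(((start : Int), ((i - 1 : Nat) : Int)), s)], false,
                (start : Int), ((i - 1 : Nat) : Int), s⟩ := by
            simp [stepB, hx]
            omega
          rw [hstep, ih1 (blocks ++ [(((start : Int), ((i - 1 : Nat) : Int)), s)]) _ _ _,
            hstop, hsum, hSi, if_pos (by omega), add_zero]

-- ===== VERDICT (by name: the statement is the Claim_ definition above) =====
theorem get_stran_spec : Claim_equal_get_stran := by
  intro data thresh _
  unfold Spec_get_stran get_stran get_stran_alt
  have hA := outerA_eq_S data thresh (data.length) 0 0 (data.map (fun _ => false)) []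
    (by omega) (by simp) (by omega) (by omega)
    (by intro j h1 h2; omega)
    (by intro j _ hj; simp [List.getD_eq_getElem?_getD])
  have hB := (bloop_eq_S data thresh data.length 0 (by omega) (by omega)).1 [] 0 0 0
  simp only [List.drop_zero, Nat.cast_zero] at hB
  rw [hA, hB]
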